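-- pv_equiv track=rewrite | github.com/JPRanx/omni_v4 | pipeline/services/cash_flow_extractor.py | _extract_vendor_name
-- ===== SOURCE A (Python) =====
-- def _extract_vendor_name(payout_reason: str) -> str:
--     """
--     Extract vendor name from payout reason using keyword matching.
--     Auto-categorizes common vendors.
--     """
--     if not payout_reason or payout_reason == 'Unknown':
--         return 'Other Vendor'
--
--     reason_lower = payout_reason.lower()
--
--     # Keyword matching for common vendors
--     if 'sysco' in reason_lower:
--         return 'Sysco Food Services'
--     elif any(x in reason_lower for x in ['us foods', 'usf', 'us food']):
--         return 'US Foods'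
--     elif any(x in reason_lower for x in ['labatt', 'beer', 'beverage', 'drink']):
--         return 'Labatt (Beverage)'
--     elif any(x in reason_lower for x in ['depot', 'restaurant depot']):
--         return 'Restaurant Depot'
--     elif any(x in reason_lower for x in ['produce', 'fresh', 'vegetable', 'fruit']):
--         return 'Produce Supplier'
--     else:
--         # Return first word capitalized as vendor name
--         words = payout_reason.split()
--         if words:
--             return words[0].title()
--         return 'Other Vendor'
-- ===== SOURCE B (Python) =====
-- # Position-major rewrite: one scan over the string positions collects every
-- # category hit via startswith, then min() picks the highest-priority category
-- # (objective: alternative decomposition, not faster).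
-- _KEYWORD_CATS = [
--     ('sysco', 0),
--     ('us foods', 1), ('usf', 1), ('us food', 1),
--     ('labatt', 2), ('beer', 2), ('beverage', 2), ('drink', 2),
--     ('depot', 3), ('restaurant depot', 3),
--     ('produce', 4), ('fresh', 4), ('vegetable', 4), ('fruit', 4),
-- ]
-- _LABELS = ['Sysco Food Services', 'US Foods', 'Labatt (Beverage)',
--            'Restaurant Depot', 'Produce Supplier']
--
--
-- def _extract_vendor_name(payout_reason: str) -> str:
--     if not payout_reason or payout_reason == 'Unknown':
--         return 'Other Vendor'
--     low = payout_reason.lower()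
--     hits = [cat for i in range(len(low))
--             for kw, cat in _KEYWORD_CATS if low.startswith(kw, i)]
--     if hits:
--         return _LABELS[min(hits)]
--     words = payout_reason.split()
--     return words[0].title() if words else 'Other Vendor'
-- ===== Notes on version B (the rewrite author's own statement) =====
-- stated objective: alternative
-- what changed: Instead of A's keyword-major if/elif chain of substring tests with early return, B scans the lowered string position by position, collects with startswith every matching category index into a list, and afterwards resolves priority by taking min() of that list as an index into a label array; guard and first-word .title() fallback unchanged.
import Mathlib
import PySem

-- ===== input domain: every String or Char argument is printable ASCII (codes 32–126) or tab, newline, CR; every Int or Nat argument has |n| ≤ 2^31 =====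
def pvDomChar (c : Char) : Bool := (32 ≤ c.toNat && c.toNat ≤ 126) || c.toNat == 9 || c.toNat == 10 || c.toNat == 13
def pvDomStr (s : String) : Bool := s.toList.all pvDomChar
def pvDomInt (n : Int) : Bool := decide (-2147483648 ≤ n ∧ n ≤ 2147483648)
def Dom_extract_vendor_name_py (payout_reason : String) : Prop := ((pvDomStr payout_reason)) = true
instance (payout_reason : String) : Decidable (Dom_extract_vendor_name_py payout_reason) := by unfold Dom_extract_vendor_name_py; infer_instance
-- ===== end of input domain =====

-- B replaces A's keyword-major if/elif chain by a position-major scan that collects all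
-- category hits and resolves priority with min() afterwards (objective: alternative).

-- ===== PORT A =====
-- hand port of str.title(), exact on ASCII: a letter is titlecased iff the previous char is not a letter
def pvTitleChars (prevAlpha : Bool) : List Char → List Char
  | [] => []
  | c :: cs =>
    if PySem.Chars.isalpha c then
      (if prevAlpha then PySem.Chars.lowerChar c else PySem.Chars.upperChar c) :: pvTitleChars true cs
    else
      c :: pvTitleChars false cs

def pvTitle (s : String) : String := String.ofList (pvTitleChars false s.toList)

def extract_vendor_name_py (payout_reason : String) : String :=
  if payout_reason = "" || payout_reason = "Unknown" then "Other Vendor"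
  else
    let reason_lower := PySem.Str.lower payout_reason
    if PySem.Str.isIn "sysco" reason_lower then "Sysco Food Services"
    else if (["us foods", "usf", "us food"].any fun x => PySem.Str.isIn x reason_lower) then "US Foods"
    else if (["labatt", "beer", "beverage", "drink"].any fun x => PySem.Str.isIn x reason_lower) then "Labatt (Beverage)"
    else if (["depot", "restaurant depot"].any fun x => PySem.Str.isIn x reason_lower) then "Restaurant Depot"
    else if (["produce", "fresh", "vegetable", "fruit"].any fun x => PySem.Str.isIn x reason_lower) then "Produce Supplier"
    else
      match PySem.Str.split₀ payout_reason with
      | w :: _ => pvTitle w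
      | [] => "Other Vendor"

-- ===== PORT B =====
def pvKeywordCats : List (String × Nat) :=
  [("sysco", 0),
   ("us foods", 1), ("usf", 1), ("us food", 1),
   ("labatt", 2), ("beer", 2), ("beverage", 2), ("drink", 2),
   ("depot", 3), ("restaurant depot", 3),
   ("produce", 4), ("fresh", 4), ("vegetable", 4), ("fruit", 4)]

def pvLabels : List String :=
  ["Sysco Food Services", "US Foods", "Labatt (Beverage)", "Restaurant Depot", "Produce Supplier"]

-- Source B's comprehension: for each position i of low, every category whose keyword starts there.
-- low.startswith(kw, i) with 0 ≤ i ≤ len(low) is exactly kw.toList <+: low.drop i (ASCII-exact).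
def pvHits (low : List Char) : List Nat :=
  (PySem.List.pyRange 0 (low.length : Int) 1).flatMap (fun i =>
    pvKeywordCats.filterMap (fun p =>
      if p.1.toList.isPrefixOf (low.drop i.toNat) then some p.2 else none))

def extract_vendor_name_py_alt (payout_reason : String) : String :=
  if payout_reason = "" || payout_reason = "Unknown" then "Other Vendor"
  else
    let low := PySem.Str.lower payout_reason
    let hits := pvHits low.toList
    match PySem.List.min? hits (fun x => x) with
    | some m => PySem.List.pyGetD pvLabels (m : Int) "Other Vendor"  -- _LABELS[min(hits)]; min(hits) < 5 always, default unreachable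
    | none =>
      match PySem.Str.split₀ payout_reason with
      | w :: _ => pvTitle w
      | [] => "Other Vendor"

-- ===== PRECONDITION & SPEC =====
def Spec_extract_vendor_name_py (payout_reason : String) (out : String) : Prop := out = extract_vendor_name_py_alt payout_reason
instance (payout_reason : String) (out : String) : Decidable (Spec_extract_vendor_name_py payout_reason out) := by unfold Spec_extract_vendor_name_py; infer_instance

-- ===== CLAIM (what is proved, stated in full; the proofs are below) =====
def Claim_equal_extract_vendor_name_py : Prop := ∀ (payout_reason : String), Dom_extract_vendor_name_py payout_reason → Spec_extract_vendor_name_py payout_reason (extract_vendor_name_py payout_reason)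

-- ===== LEMMAS AND PROOFS =====

-- a nonempty keyword is a prefix at some valid position iff it is an infix ('kw in low')
theorem pv_exists_pos_iff_isIn (kw cs : List Char) (hne : kw ≠ []) :
    (∃ i : Int, (0 ≤ i ∧ i < (cs.length : Int)) ∧ kw.isPrefixOf (cs.drop i.toNat) = true)
      ↔ PySem.Chars.isIn kw cs = true := by
  rw [← PySem.Chars.exists_prefix_drop_iff_isIn]
  constructor
  · rintro ⟨i, _, hpre⟩
    exact ⟨i.toNat, List.isPrefixOf_iff_prefix.mp hpre⟩
  · rintro ⟨j, hpre⟩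
    have hdrop : cs.drop j ≠ [] := by
      intro h
      rw [h] at hpre
      exact hne (List.prefix_nil.mp hpre)
    have hj : j < cs.length := by
      by_contra hge
      exact hdrop (List.drop_eq_nil_of_le (by omega))
    exact ⟨(j : Int), ⟨by positivity, by exact_mod_cast hj⟩,
      by simpa using List.isPrefixOf_iff_prefix.mpr hpre⟩

theorem pv_mem_hits_iff (cs : List Char) (c : Nat) :
    c ∈ pvHits cs ↔ ∃ p ∈ pvKeywordCats, p.2 = c ∧ PySem.Chars.isIn p.1.toList cs = true := by
  unfold pvHits
  simp only [List.mem_flatMap, List.mem_filterMap, PySem.List.mem_pyRange_one]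
  constructor
  · rintro ⟨i, hi, p, hp, hif⟩
    refine ⟨p, hp, ?_, ?_⟩
    · by_cases h : p.1.toList.isPrefixOf (cs.drop i.toNat) = true <;> simp [h] at hif
      exact hif
    · have h : p.1.toList.isPrefixOf (cs.drop i.toNat) = true := by
        by_cases h : p.1.toList.isPrefixOf (cs.drop i.toNat) = true <;> simp [h] at hif
        exact h
      have hne : p.1.toList ≠ [] := by
        fin_cases hp <;> simp
      exact (pv_exists_pos_iff_isIn p.1.toList cs hne).mp ⟨i, hi, h⟩
  · rintro ⟨p, hp, hc, hin⟩
    have hne : p.1.toList ≠ [] := by fin_cases hp <;> simp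
    obtain ⟨i, hi, hpre⟩ := (pv_exists_pos_iff_isIn p.1.toList cs hne).mpr hin
    exact ⟨i, hi, p, hp, by simp [hpre, hc]⟩

-- ===== VERDICT (by name: the statement is the Claim_ definition above) =====
theorem extract_vendor_name_py_spec : Claim_equal_extract_vendor_name_py := by
  intro p _
  unfold Spec_extract_vendor_name_py extract_vendor_name_py extract_vendor_name_py_alt
  by_cases hg : p = "" ∨ p = "Unknown"
  · rcases hg with h | h <;> simp [h]
  · rw [not_or] at hg
    simp only [hg.1, hg.2, decide_false, Bool.or_self, Bool.false_eq_true, if_false,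
      PySem.Str.isIn_eq, List.any_cons, List.any_nil, Bool.or_false, Bool.or_eq_true]
    set cs := (PySem.Str.lower p).toList with hcs
    have hmem : ∀ c : Nat, c ∈ pvHits cs ↔
        ∃ q ∈ pvKeywordCats, q.2 = c ∧ PySem.Chars.isIn q.1.toList cs = true :=
      fun c => pv_mem_hits_iff cs c
    have hsome : ∀ c : Nat, c ∈ pvHits cs →
        ∃ m, PySem.List.min? (pvHits cs) (fun x => x) = some m := by
      intro c hc
      cases hmin : PySem.List.min? (pvHits cs) (fun x => x) with
      | none =>
        rw [(PySem.List.min?_eq_none_iff _ _).mp hmin] at hc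
        exact absurd hc (by simp)
      | some m => exact ⟨m, rfl⟩
    by_cases h0 : PySem.Chars.isIn ['s', 'y', 's', 'c', 'o'] cs = true
    · -- category 0
      have hcm : 0 ∈ pvHits cs := (hmem 0).mpr ⟨("sysco", 0), by simp [pvKeywordCats], rfl, by exact h0⟩
      obtain ⟨m, hm⟩ := hsome 0 hcm
      have hmc : m = 0 := Nat.le_zero.mp (PySem.List.min?_isMin hm 0 hcm)
      subst hmc
      simp [h0, hm, PySem.List.pyGetD, pvLabels]
    · by_cases h1 : PySem.Chars.isIn ['u', 's', ' ', 'f', 'o', 'o', 'd', 's'] cs = true ∨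
          PySem.Chars.isIn ['u', 's', 'f'] cs = true ∨ PySem.Chars.isIn ['u', 's', ' ', 'f', 'o', 'o', 'd'] cs = true
      · -- category 1
        have hcm : 1 ∈ pvHits cs := by
          rcases h1 with h | h | h
          · exact (hmem 1).mpr ⟨("us foods", 1), by simp [pvKeywordCats], rfl, by exact h⟩
          · exact (hmem 1).mpr ⟨("usf", 1), by simp [pvKeywordCats], rfl, by exact h⟩
          · exact (hmem 1).mpr ⟨("us food", 1), by simp [pvKeywordCats], rfl, by exact h⟩
        obtain ⟨m, hm⟩ := hsome 1 hcm
        have hle : m ≤ 1 := PySem.List.min?_isMin hm 1 hcm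
        have hmc : m = 1 := by
          obtain ⟨q, hq, hqc, hqin⟩ := (hmem m).mp (PySem.List.min?_mem hm)
          unfold pvKeywordCats at hq
          fin_cases hq <;> simp_all <;> omega
        subst hmc
        simp [h0, h1, hm, PySem.List.pyGetD, pvLabels]
      · by_cases h2 : PySem.Chars.isIn ['l', 'a', 'b', 'a', 't', 't'] cs = true ∨
            PySem.Chars.isIn ['b', 'e', 'e', 'r'] cs = true ∨
            PySem.Chars.isIn ['b', 'e', 'v', 'e', 'r', 'a', 'g', 'e'] cs = true ∨
            PySem.Chars.isIn ['d', 'r', 'i', 'n', 'k'] cs = true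
        · -- category 2
          have hcm : 2 ∈ pvHits cs := by
            rcases h2 with h | h | h | h
            · exact (hmem 2).mpr ⟨("labatt", 2), by simp [pvKeywordCats], rfl, by exact h⟩
            · exact (hmem 2).mpr ⟨("beer", 2), by simp [pvKeywordCats], rfl, by exact h⟩
            · exact (hmem 2).mpr ⟨("beverage", 2), by simp [pvKeywordCats], rfl, by exact h⟩
            · exact (hmem 2).mpr ⟨("drink", 2), by simp [pvKeywordCats], rfl, by exact h⟩
          obtain ⟨m, hm⟩ := hsome 2 hcm
          have hle : m ≤ 2 := PySem.List.min?_isMin hm 2 hcm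
          have hmc : m = 2 := by
            obtain ⟨q, hq, hqc, hqin⟩ := (hmem m).mp (PySem.List.min?_mem hm)
            unfold pvKeywordCats at hq
            fin_cases hq <;> simp_all <;> omega
          subst hmc
          simp [h0, h1, h2, hm, PySem.List.pyGetD, pvLabels]
        · by_cases h3 : PySem.Chars.isIn ['d', 'e', 'p', 'o', 't'] cs = true ∨
              PySem.Chars.isIn ['r', 'e', 's', 't', 'a', 'u', 'r', 'a', 'n', 't', ' ', 'd', 'e', 'p', 'o', 't'] cs = true
          · -- category 3
            have hcm : 3 ∈ pvHits cs := by
              rcases h3 with h | h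
              · exact (hmem 3).mpr ⟨("depot", 3), by simp [pvKeywordCats], rfl, by exact h⟩
              · exact (hmem 3).mpr ⟨("restaurant depot", 3), by simp [pvKeywordCats], rfl, by exact h⟩
            obtain ⟨m, hm⟩ := hsome 3 hcm
            have hle : m ≤ 3 := PySem.List.min?_isMin hm 3 hcm
            have hmc : m = 3 := by
              obtain ⟨q, hq, hqc, hqin⟩ := (hmem m).mp (PySem.List.min?_mem hm)
              unfold pvKeywordCats at hq
              fin_cases hq <;> simp_all <;> omega
            subst hmc
            simp [h0, h1, h2, h3, hm, PySem.List.pyGetD, pvLabels]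
          · by_cases h4 : PySem.Chars.isIn ['p', 'r', 'o', 'd', 'u', 'c', 'e'] cs = true ∨
                PySem.Chars.isIn ['f', 'r', 'e', 's', 'h'] cs = true ∨
                PySem.Chars.isIn ['v', 'e', 'g', 'e', 't', 'a', 'b', 'l', 'e'] cs = true ∨
                PySem.Chars.isIn ['f', 'r', 'u', 'i', 't'] cs = true
            · -- category 4
              have hcm : 4 ∈ pvHits cs := by
                rcases h4 with h | h | h | h
                · exact (hmem 4).mpr ⟨("produce", 4), by simp [pvKeywordCats], rfl, by exact h⟩
                · exact (hmem 4).mpr ⟨("fresh", 4), by simp [pvKeywordCats], rfl, by exact h⟩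
                · exact (hmem 4).mpr ⟨("vegetable", 4), by simp [pvKeywordCats], rfl, by exact h⟩
                · exact (hmem 4).mpr ⟨("fruit", 4), by simp [pvKeywordCats], rfl, by exact h⟩
              obtain ⟨m, hm⟩ := hsome 4 hcm
              have hle : m ≤ 4 := PySem.List.min?_isMin hm 4 hcm
              have hmc : m = 4 := by
                obtain ⟨q, hq, hqc, hqin⟩ := (hmem m).mp (PySem.List.min?_mem hm)
                unfold pvKeywordCats at hq
                fin_cases hq <;> simp_all <;> omega
              subst hmc
              simp [h0, h1, h2, h3, h4, hm, PySem.List.pyGetD, pvLabels]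
            · -- no keyword matches: hits is empty, both fall back
              simp only [not_or] at h1 h2 h3 h4
              obtain ⟨h1a, h1b, h1c⟩ := h1
              obtain ⟨h2a, h2b, h2c, h2d⟩ := h2
              obtain ⟨h3a, h3b⟩ := h3
              obtain ⟨h4a, h4b, h4c, h4d⟩ := h4
              have hnil : pvHits cs = [] := by
                rw [List.eq_nil_iff_forall_not_mem]
                intro c hc
                obtain ⟨q, hq, -, hqin⟩ := (hmem c).mp hc
                unfold pvKeywordCats at hq
                simp only [List.mem_cons, List.not_mem_nil, or_false] at hq
                rcases hq with rfl|rfl|rfl|rfl|rfl|rfl|rfl|rfl|rfl|rfl|rfl|rfl|rfl|rfl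
                exacts [h0 (by exact hqin), h1a (by exact hqin), h1b (by exact hqin),
                  h1c (by exact hqin), h2a (by exact hqin), h2b (by exact hqin),
                  h2c (by exact hqin), h2d (by exact hqin), h3a (by exact hqin),
                  h3b (by exact hqin), h4a (by exact hqin), h4b (by exact hqin),
                  h4c (by exact hqin), h4d (by exact hqin)]
              have hmin : PySem.List.min? (pvHits cs) (fun x => x) = none :=
                (PySem.List.min?_eq_none_iff _ _).mpr hnil
              simp [hmin, h0, h1a, h1b, h1c, h2a, h2b, h2c, h2d, h3a, h3b, h4a, h4b,
                h4c, h4d]
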